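-- pv_equiv track=rewrite | github.com/xorkevin/advent2015 | advent8.py | parseDiffEncode
-- ===== SOURCE A (Python) =====
-- def parseDiffEncode(string):
--     k = 2
--     a = len(string)
--     text = list(string)
--     while len(text)>0:
--         b = text.pop(0)
--         if b == '\\' or b == '\"':
--             k += 1
--         k += 1
--     return k - a
-- ===== SOURCE B (Python) =====
-- def parseDiffEncode(string):
--     return 2 + sum(1 for c in string if c == '\\' or c == '"')
-- ===== Notes on version B (the rewrite author's own statement) =====
-- stated objective: simpler
-- what changed: A's per-character +1 increments and the final -len(string) cancel, so B drops the list/pop(0) loop and length bookkeeping and just counts backslash and quote characters in one comprehension, adding 2.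
import Mathlib
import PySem

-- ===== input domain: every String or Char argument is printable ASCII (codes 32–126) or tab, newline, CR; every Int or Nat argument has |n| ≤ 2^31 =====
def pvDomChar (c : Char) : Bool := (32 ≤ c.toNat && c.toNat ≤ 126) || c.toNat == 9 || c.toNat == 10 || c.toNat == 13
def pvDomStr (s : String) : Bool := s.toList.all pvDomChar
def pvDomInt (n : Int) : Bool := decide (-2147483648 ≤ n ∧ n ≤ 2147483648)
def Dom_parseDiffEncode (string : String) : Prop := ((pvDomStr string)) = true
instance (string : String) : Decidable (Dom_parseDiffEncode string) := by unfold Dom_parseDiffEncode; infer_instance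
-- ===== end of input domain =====

-- B drops A's pop(0) loop and length bookkeeping: the difference is just 2 plus the count of backslash/quote characters (simpler; return value only).

-- ===== PORT A =====
-- the while loop: pops the head of text, bumps k (twice for \ and "), until text is empty
def parseDiffEncodeLoop (text : List Char) (k : Int) : Int :=
  match text with
  | [] => k
  | b :: rest =>
      let k := if b = '\\' ∨ b = '"' then k + 1 else k
      parseDiffEncodeLoop rest (k + 1)

def parseDiffEncode (string : String) : Int :=
  let k : Int := 2
  let a : Int := (string.toList.length : Int)
  parseDiffEncodeLoop string.toList k - a

-- ===== PORT B =====
def parseDiffEncode_alt (string : String) : Int :=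
  2 + ((string.toList.countP (fun c => c = '\\' ∨ c = '"')) : Int)

-- ===== PRECONDITION & SPEC =====
def Spec_parseDiffEncode (string : String) (out : Int) : Prop := out = parseDiffEncode_alt string
instance (string : String) (out : Int) : Decidable (Spec_parseDiffEncode string out) := by unfold Spec_parseDiffEncode; infer_instance

-- ===== CLAIM (what is proved, stated in full; the proofs are below) =====
def Claim_equal_parseDiffEncode : Prop := ∀ (string : String), Dom_parseDiffEncode string → Spec_parseDiffEncode string (parseDiffEncode string)

-- ===== LEMMAS AND PROOFS =====
theorem parseDiffEncodeLoop_eq (text : List Char) (k : Int) :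
    parseDiffEncodeLoop text k
      = k + (text.length : Int) + (text.countP (fun c => c = '\\' ∨ c = '"') : Int) := by
  induction text generalizing k with
  | nil => simp [parseDiffEncodeLoop]
  | cons b rest ih =>
      simp only [parseDiffEncodeLoop, ih, List.countP_cons, List.length_cons]
      by_cases h : b = '\\' ∨ b = '"' <;> simp [h] <;> ring

-- ===== VERDICT (by name: the statement is the Claim_ definition above) =====
theorem parseDiffEncode_spec : Claim_equal_parseDiffEncode := by
  intro s _
  unfold Spec_parseDiffEncode parseDiffEncode parseDiffEncode_alt
  simp only [parseDiffEncodeLoop_eq]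
  ring
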